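-- pv_equiv track=rewrite | github.com/armyrunner/CS1410-OOP2 | dnaSequence/dnaSequencing.py | findLargestOverlap
-- ===== SOURCE A (Python) =====
-- def strandsAreNotEmpty(strand1, strand2):
--
--     strndlen1 = len(strand1)
--     strndlen2 = len(strand2)
--
--     if strndlen1 >= 1 and strndlen2 >= 1:
--         return True
--     elif strndlen2 < 1 or strndlen1 < 1:
--         return False
--
-- def strandsAreEqualLengths(strand1, strand2):
--
--     strndlen1 = len(strand1)
--     strndlen2 = len(strand2)
--
--     if strndlen1 == strndlen2:
--         return True
--     else:
--         return False
--
-- def candidateOverlapsTarget(target, candidate, overlap):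
--     return target[len(target)-overlap:] == candidate[:overlap]
--
-- def findLargestOverlap(target, candidate):
--
--     count = 0
--
--     if not strandsAreNotEmpty(target, candidate):
--         return -1
--
--     if not strandsAreEqualLengths(target, candidate):
--         return -1
--
--     for i in range(len(target)+1):
--
--         if candidateOverlapsTarget(target, candidate, i):
--             count = i
--
--     return count
-- ===== SOURCE B (Python) =====
-- def _overlapAt(target, candidate, k):
--     # two-pointer check: target's last k chars vs candidate's first k chars
--     n = len(target)
--     for j in range(k):
--         if target[n - k + j] != candidate[j]:
--             return False
--     return True
--
-- def findLargestOverlap(target, candidate):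
--     n = len(target)
--     if n == 0 or len(candidate) != n:
--         return -1
--     k = n
--     while not _overlapAt(target, candidate, k):
--         k -= 1
--     return k
-- ===== Notes on version B (the rewrite author's own statement) =====
-- stated objective: faster
-- what changed: Replaces the upward full scan that slices both strings at every i and keeps the last match with a downward scan that returns at the first (largest) matching overlap, tested by a two-pointer character walk instead of slice allocation and comparison.
import Mathlib
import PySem

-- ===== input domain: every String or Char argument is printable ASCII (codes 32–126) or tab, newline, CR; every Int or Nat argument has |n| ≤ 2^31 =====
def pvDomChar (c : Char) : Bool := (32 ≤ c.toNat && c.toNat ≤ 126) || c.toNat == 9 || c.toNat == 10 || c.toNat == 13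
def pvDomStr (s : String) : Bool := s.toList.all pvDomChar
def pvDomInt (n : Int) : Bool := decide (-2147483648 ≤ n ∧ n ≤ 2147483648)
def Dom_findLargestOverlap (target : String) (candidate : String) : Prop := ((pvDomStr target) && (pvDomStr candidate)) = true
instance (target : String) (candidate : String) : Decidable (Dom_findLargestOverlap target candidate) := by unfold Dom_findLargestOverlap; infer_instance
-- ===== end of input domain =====

-- B replaces A's upward full scan over sliced copies (keeping the last match) by a downward
-- early-exit scan testing each overlap with a two-pointer character walk; return values proved equal.

-- ===== PORT A =====
def strandsAreNotEmpty (strand1 strand2 : String) : Bool :=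
  let strndlen1 : Int := PySem.Str.len strand1
  let strndlen2 : Int := PySem.Str.len strand2
  if strndlen1 ≥ 1 ∧ strndlen2 ≥ 1 then true
  else false  -- the elif condition is the exact complement, so it always yields False here

def strandsAreEqualLengths (strand1 strand2 : String) : Bool :=
  if PySem.Str.len strand1 = PySem.Str.len strand2 then true else false

def candidateOverlapsTarget (target candidate : String) (overlap : Int) : Bool :=
  PySem.List.slice target.toList (some (PySem.Str.len target - overlap)) none
    == PySem.List.slice candidate.toList none (some overlap)

def findLargestOverlap (target : String) (candidate : String) : Int :=
  if ¬ strandsAreNotEmpty target candidate then -1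
  else if ¬ strandsAreEqualLengths target candidate then -1
  else
    (PySem.List.pyRange 0 (PySem.Str.len target + 1) 1).foldl
      (fun count i => if candidateOverlapsTarget target candidate i then i else count) 0

-- ===== PORT B =====
-- two-pointer walk of _overlapAt: compare k chars of (suffix of target) with candidate
def eqFirst : Nat → List Char → List Char → Bool
  | 0, _, _ => true
  | k+1, a :: as, b :: bs => a == b && eqFirst k as bs
  | _+1, _, _ => false  -- unreachable for the lengths B uses

def overlapAt (t c : List Char) (k : Nat) : Bool :=
  eqFirst k (t.drop (t.length - k)) c

-- the while loop: k counts down from n; overlapAt _ _ 0 is always true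
def goDown (t c : List Char) : Nat → Int
  | 0 => 0
  | k+1 => if overlapAt t c (k+1) then ((k : Int) + 1) else goDown t c k

def findLargestOverlap_alt (target : String) (candidate : String) : Int :=
  let t := target.toList
  let c := candidate.toList
  if t.length = 0 ∨ c.length ≠ t.length then -1
  else goDown t c t.length

-- ===== PRECONDITION & SPEC =====
def Spec_findLargestOverlap (target : String) (candidate : String) (out : Int) : Prop := out = findLargestOverlap_alt target candidate
instance (target : String) (candidate : String) (out : Int) : Decidable (Spec_findLargestOverlap target candidate out) := by unfold Spec_findLargestOverlap; infer_instance

-- ===== CLAIM (what is proved, stated in full; the proofs are below) =====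
def Claim_equal_findLargestOverlap : Prop := ∀ (target : String) (candidate : String), Dom_findLargestOverlap target candidate → Spec_findLargestOverlap target candidate (findLargestOverlap target candidate)

-- ===== LEMMAS AND PROOFS =====

-- eqFirst compares the first k characters of both lists
theorem eqFirst_eq_take : ∀ (k : Nat) (xs ys : List Char), k ≤ xs.length →
    eqFirst k xs ys = (xs.take k == ys.take k) := by
  intro k
  induction k with
  | zero => intro xs ys _; simp [eqFirst]
  | succ k ih =>
    intro xs ys hk
    cases xs with
    | nil => simp at hk
    | cons a as =>
      cases ys with
      | nil => simp [eqFirst]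
      | cons b bs =>
        have : k ≤ as.length := by simp at hk; omega
        simp [eqFirst, ih _ _ this, List.take_succ_cons]

-- B's two-pointer check agrees with A's slice comparison (k ≤ both lengths)
theorem overlapAt_eq_slices (t c : List Char) (k : Nat) (hk : k ≤ t.length) :
    overlapAt t c k = (t.drop (t.length - k) == c.take k) := by
  unfold overlapAt
  have hlen : (t.drop (t.length - k)).length = k := by
    rw [List.length_drop]; omega
  rw [eqFirst_eq_take k _ c (le_of_eq hlen.symm), List.take_of_length_le (le_of_eq hlen)]

-- A's fold over range(m+1) equals B's countdown from m (m ≤ |t|, |c| = |t|)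
theorem fold_eq_goDown (t c : List Char) (m : Nat) (hm : m ≤ t.length) :
    (PySem.List.pyRange 0 ((m : Int) + 1) 1).foldl
      (fun count i =>
        if PySem.List.slice t (some ((t.length : Int) - i)) none
            == PySem.List.slice c none (some i) then i else count) 0
      = goDown t c m := by
  induction m with
  | zero =>
    simp only [Nat.cast_zero]
    rw [PySem.List.pyRange_one_succ_right (by omega), PySem.List.pyRange_one_eq_nil (by omega)]
    show (if _ = true then (0:Int) else 0) = goDown t c 0
    split <;> rfl
  | succ k ih =>
    have hk : k ≤ t.length := by omega
    rw [show ((k + 1 : Nat) : Int) + 1 = ((k : Int) + 1) + 1 by push_cast; ring,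
        PySem.List.pyRange_one_succ_right (by omega)]
    rw [List.foldl_append, ih hk]
    simp only [List.foldl]
    have hs1 : PySem.List.slice t (some ((t.length : Int) - ((k : Int) + 1))) none
        = t.drop (t.length - (k + 1)) := by
      rw [show (t.length : Int) - ((k : Int) + 1) = ((t.length - (k+1) : Nat) : Int) by omega,
          PySem.List.slice_from_natCast]
    have hs2 : PySem.List.slice c none (some ((k : Int) + 1)) = c.take (k + 1) := by
      rw [show ((k : Int) + 1) = ((k + 1 : Nat) : Int) by push_cast; ring,
          PySem.List.slice_to_natCast]
    rw [hs1, hs2, goDown, overlapAt_eq_slices t c (k+1) (by omega)]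

theorem strandsAreNotEmpty_iff (s1 s2 : String) :
    strandsAreNotEmpty s1 s2 = true ↔ (s1.toList.length ≠ 0 ∧ s2.toList.length ≠ 0) := by
  simp only [strandsAreNotEmpty]
  have e1 : PySem.Str.len s1 = (s1.toList.length : Int) := rfl
  have e2 : PySem.Str.len s2 = (s2.toList.length : Int) := rfl
  rw [e1, e2]
  split <;> rename_i h
  · exact iff_of_true rfl (by omega)
  · exact iff_of_false (by simp) (by omega)

theorem strandsAreEqualLengths_iff (s1 s2 : String) :
    strandsAreEqualLengths s1 s2 = true ↔ s1.toList.length = s2.toList.length := by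
  simp only [strandsAreEqualLengths]
  have e1 : PySem.Str.len s1 = (s1.toList.length : Int) := rfl
  have e2 : PySem.Str.len s2 = (s2.toList.length : Int) := rfl
  rw [e1, e2]
  split <;> rename_i h
  · exact iff_of_true rfl (by omega)
  · exact iff_of_false (by simp) (by omega)

-- ===== VERDICT (by name: the statement is the Claim_ definition above) =====
theorem findLargestOverlap_spec : Claim_equal_findLargestOverlap := by
  intro target candidate _
  unfold Spec_findLargestOverlap findLargestOverlap findLargestOverlap_alt
  by_cases h1 : target.toList.length ≠ 0 ∧ candidate.toList.length ≠ 0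
  · rw [if_neg (show ¬ ¬ (strandsAreNotEmpty target candidate = true) by
      rw [strandsAreNotEmpty_iff]; exact not_not_intro h1)]
    by_cases h2 : target.toList.length = candidate.toList.length
    · rw [if_neg (show ¬ ¬ (strandsAreEqualLengths target candidate = true) by
        rw [strandsAreEqualLengths_iff]; exact not_not_intro h2),
        if_neg (show ¬ (target.toList.length = 0 ∨ candidate.toList.length ≠ target.toList.length) by
          omega)]
      simp only [candidateOverlapsTarget,
        show PySem.Str.len target = (target.toList.length : Int) from rfl]
      exact fold_eq_goDown target.toList candidate.toList target.toList.length le_rfl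
    · rw [if_pos (show ¬ (strandsAreEqualLengths target candidate = true) by
        rw [strandsAreEqualLengths_iff]; exact h2),
        if_pos (show target.toList.length = 0 ∨ candidate.toList.length ≠ target.toList.length by
          omega)]
  · rw [if_pos (show ¬ (strandsAreNotEmpty target candidate = true) by
      rw [strandsAreNotEmpty_iff]; exact h1),
      if_pos (show target.toList.length = 0 ∨ candidate.toList.length ≠ target.toList.length by
        omega)]
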